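-- pv_equiv track=rewrite | github.com/AjayKannan97/Algorithms-in-Computational-Biology | Assign 3/CSE494_598_hw3_KANNAN/driver.py | rank_Bwt
-- ===== SOURCE A (Python) =====
-- def rank_Bwt(s):
--     d = dict()
--     ranks = []
--     for c in s:
--         if c not in d:
--             d[c] = 0
--         ranks.append(d[c])
--         d[c] += 1
--     return ranks, d
-- ===== SOURCE B (Python) =====
-- def rank_Bwt(s):
--     ranks = [s[:i].count(s[i]) for i in range(len(s))]
--     counts = {c: s.count(c) for c in dict.fromkeys(s)}
--     return ranks, counts
-- ===== Notes on version B (the rewrite author's own statement) =====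
-- stated objective: simpler
-- what changed: replaces the running dict-of-counters loop by a per-index closed form (rank i = count of s[i] in the prefix s[:i]) and builds the count dict directly over the first-occurrence-deduplicated characters with str.count
import Mathlib
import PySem

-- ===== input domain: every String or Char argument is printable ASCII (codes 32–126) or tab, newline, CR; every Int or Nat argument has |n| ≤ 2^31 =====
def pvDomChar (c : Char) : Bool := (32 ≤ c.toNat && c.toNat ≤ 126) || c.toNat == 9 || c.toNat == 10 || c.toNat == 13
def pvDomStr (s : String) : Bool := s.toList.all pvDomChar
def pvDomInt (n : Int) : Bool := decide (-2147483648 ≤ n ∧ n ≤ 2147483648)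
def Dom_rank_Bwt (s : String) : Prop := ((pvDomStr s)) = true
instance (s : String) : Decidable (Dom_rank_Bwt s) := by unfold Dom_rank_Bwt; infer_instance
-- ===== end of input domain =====

-- B replaces A's single running-counter loop by a per-index closed form (rank i = count of
-- s[i] in the prefix s[:i]) plus a direct count dict over the first-occurrence dedup; same values, not faster.

-- ===== PORT A =====
-- one loop iteration of A: ensure the key, append d[c], then d[c] += 1
def rankBwtStepA (st : PySem.Dict String Int × List Int) (c : Char) :
    PySem.Dict String Int × List Int :=
  let k := String.ofList [c]
  let d := if st.1.contains k then st.1 else st.1.insert k 0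
  let ranks := st.2 ++ [d.getD k 0]
  (d.insert k (d.getD k 0 + 1), ranks)

def rank_Bwt (s : String) : List Int × (List (String × Int)) :=
  let st := s.toList.foldl rankBwtStepA (PySem.Dict.empty, [])
  (st.2, st.1.items)

-- ===== PORT B =====
def rank_Bwt_alt (s : String) : List Int × (List (String × Int)) :=
  let cs := s.toList
  -- [s[:i].count(s[i]) for i in range(len(s))] : i is always in range, so s[i] is getD, s[:i] is take
  let ranks := (List.range cs.length).map (fun i => (((cs.take i).count (cs.getD i ' ') : Int)))
  -- {c: s.count(c) for c in dict.fromkeys(s)}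
  let counts := (PySem.List.dedup cs).map (fun c => (String.ofList [c], (cs.count c : Int)))
  (ranks, counts)

-- ===== PRECONDITION & SPEC =====
def Spec_rank_Bwt (s : String) (out : List Int × (List (String × Int))) : Prop := out = rank_Bwt_alt s
instance (s : String) (out : List Int × (List (String × Int))) : Decidable (Spec_rank_Bwt s out) := by unfold Spec_rank_Bwt; infer_instance

-- ===== CLAIM (what is proved, stated in full; the proofs are below) =====
def Claim_equal_rank_Bwt : Prop := ∀ (s : String), Dom_rank_Bwt s → Spec_rank_Bwt s (rank_Bwt s)

-- ===== LEMMAS AND PROOFS =====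

theorem mkOne_injective : Function.Injective (fun c : Char => String.ofList [c]) := by
  intro a b h
  have := congrArg String.toList h
  simp at this
  exact this

-- PySem.Set.ofList commutes with mapping an injective function
theorem foldl_add_map {α β : Type} [DecidableEq α] [DecidableEq β]
    (f : α → β) (hf : Function.Injective f) (t : List α) (acc : List α) :
    (t.map f).foldl PySem.Set.add (acc.map f) = (t.foldl PySem.Set.add acc).map f := by
  induction t generalizing acc with
  | nil => rfl
  | cons c t ih =>
    simp only [List.map_cons, List.foldl_cons]
    rw [show PySem.Set.add (acc.map f) (f c) = (PySem.Set.add acc c).map f from ?_]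
    · exact ih _
    · simp only [PySem.Set.add, PySem.Set.contains]
      by_cases h : c ∈ acc
      · simp [h, List.mem_map_of_injective hf]
      · simp [h, List.mem_map_of_injective hf]

theorem ofList_map {α β : Type} [DecidableEq α] [DecidableEq β]
    (f : α → β) (hf : Function.Injective f) (t : List α) :
    PySem.Set.ofList (t.map f) = (PySem.Set.ofList t).map f := by
  rw [PySem.Set.ofList_eq_foldl, PySem.Set.ofList_eq_foldl]
  simpa using foldl_add_map f hf t []

-- A's composite dict update is a single insert
theorem stepA_dict (d : PySem.Dict String Int) (k : String) :
    (let d' := if d.contains k then d else d.insert k 0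
     d'.insert k (d'.getD k 0 + 1)) = d.insert k (d.getD k 0 + 1) := by
  by_cases h : d.contains k = true
  · simp [h]
  · simp only [Bool.not_eq_true] at h
    simp [h, PySem.Dict.getD_insert_self, PySem.Dict.insert_insert_self,
      PySem.Dict.getD_of_not_contains d 0 h]

-- the value A appends is d[c] before the update, with 0 for a fresh key
theorem stepA_rank (d : PySem.Dict String Int) (k : String) :
    (let d' := if d.contains k then d else d.insert k 0
     d'.getD k 0) = d.getD k 0 := by
  by_cases h : d.contains k = true
  · simp [h]
  · simp only [Bool.not_eq_true] at h
    simp [h, PySem.Dict.getD_insert_self, PySem.Dict.getD_of_not_contains d 0 h]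

-- loop invariant: after processing t, A's dict is the counter of the 1-char-string keys and
-- A's ranks list is B's closed form on t
theorem foldl_stepA (t : List Char) :
    t.foldl rankBwtStepA (PySem.Dict.empty, []) =
      (PySem.Dict.counter (t.map (fun c => String.ofList [c])),
       (List.range t.length).map (fun i => (((t.take i).count (t.getD i ' ') : Int)))) := by
  induction t using List.reverseRecOn with
  | nil => rfl
  | append_singleton t c ih =>
    rw [List.foldl_append, List.foldl_cons, List.foldl_nil, ih]
    have hd := stepA_dict (PySem.Dict.counter (t.map (fun c => String.ofList [c]))) (String.ofList [c])
    have hr := stepA_rank (PySem.Dict.counter (t.map (fun c => String.ofList [c]))) (String.ofList [c])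
    simp only [rankBwtStepA] at *
    rw [hd, hr, Prod.mk.injEq]
    refine ⟨?_, ?_⟩
    · rw [← PySem.Dict.foldl_insert_getD_add_one_eq_counter, ← PySem.Dict.foldl_insert_getD_add_one_eq_counter]
      simp [List.foldl_append]
    · rw [PySem.Dict.getD_counter, List.count_map_of_injective t _ mkOne_injective,
        List.length_append, List.length_singleton, List.range_succ, List.map_append]
      congr 1
      · apply List.map_congr_left
        intro i hi
        rw [List.mem_range] at hi
        rw [List.take_append_of_le_length (le_of_lt hi)]
        congr 2
        simp [List.getD, List.getElem?_append_left hi]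
      · simp [List.getD]

theorem rank_Bwt_eq_alt (s : String) : rank_Bwt s = rank_Bwt_alt s := by
  unfold rank_Bwt rank_Bwt_alt
  rw [foldl_stepA]
  refine Prod.ext rfl ?_
  simp only [PySem.Dict.items_counter, PySem.List.dedup_eq_ofList,
    ofList_map _ mkOne_injective]
  rw [List.map_map]
  apply List.map_congr_left
  intro c hc
  simp [List.count_map_of_injective _ _ mkOne_injective]

-- ===== VERDICT (by name: the statement is the Claim_ definition above) =====
theorem rank_Bwt_spec : Claim_equal_rank_Bwt := by
  intro s _
  exact rank_Bwt_eq_alt s
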